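-- pv_equiv track=rewrite | github.com/stridera/fierymud | scripts/mud/bitflags.py | build_flags
-- ===== SOURCE A (Python) =====
-- def build_flags(flag, flag_list, offset=0) -> list[str]:
--     """Builds a string of flags from a bitfield"""
--     active = []
--     flag = int(flag)
--     if flag.bit_length() > len(flag_list):
--         raise ValueError(
--             f"Flag out of range! {flag}({bin(flag)}:{flag.bit_length()} bits = {len(flag_list)} ({flag_list})"
--         )
--     for i in range(len(flag_list)):
--         if flag & (1 << i + offset):
--             active.append(flag_list[i])
--     return active
-- ===== SOURCE B (Python) =====
-- def build_flags(flag, flag_list, offset=0) -> list[str]: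
--     """Builds a string of flags from a bitfield"""
--     flag = int(flag)
--     if flag.bit_length() > len(flag_list):
--         raise ValueError(
--             f"Flag out of range! {flag}({bin(flag)}:{flag.bit_length()} bits = {len(flag_list)} ({flag_list})"
--         )
--     # isolate the relevant window once, then consume its bits low-to-high
--     masked = (flag >> offset) & ((1 << len(flag_list)) - 1)
--     active = []
--     i = 0
--     while masked:
--         if masked & 1:
--             active.append(flag_list[i])
--         masked >>= 1
--         i += 1
--     return active
-- ===== Notes on version B (the rewrite author's own statement) =====
-- stated objective: faster
-- what changed: Instead of testing every index i of flag_list against a freshly built mask flag & (1 << i+offset), B shifts and masks the bitfield once ((flag >> offset) & ((1 << len) - 1)) and then consumes that window's bits low-to-high with a single while loop, stopping at the highest set bit.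
-- outside the precondition, e.g. on build_flags(0, [], -1): A returns [], B raises ValueError
import Mathlib
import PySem

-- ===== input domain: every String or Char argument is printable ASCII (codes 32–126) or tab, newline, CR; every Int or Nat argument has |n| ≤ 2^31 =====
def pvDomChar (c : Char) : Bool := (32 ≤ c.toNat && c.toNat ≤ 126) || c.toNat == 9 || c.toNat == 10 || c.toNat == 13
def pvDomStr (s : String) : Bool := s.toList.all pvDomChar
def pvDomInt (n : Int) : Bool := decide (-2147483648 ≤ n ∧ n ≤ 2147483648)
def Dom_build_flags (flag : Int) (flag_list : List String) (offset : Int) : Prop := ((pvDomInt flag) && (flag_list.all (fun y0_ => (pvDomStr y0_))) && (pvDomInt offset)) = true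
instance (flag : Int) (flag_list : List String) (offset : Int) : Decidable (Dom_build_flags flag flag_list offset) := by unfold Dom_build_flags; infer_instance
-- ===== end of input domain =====

-- B keeps A's validation but isolates the relevant bit window of `flag` once and consumes its
-- bits low-to-high, instead of testing every list index against a freshly built power-of-two mask.

-- ===== PORT A =====
-- 'if flag & (1 << i + offset):' — the shift amount i + offset is ≥ 0 on every input Pre_ admits
-- (0 ≤ offset, 0 ≤ i), so '.toNat' is exact there; Python raises ValueError on a negative shift.
def build_flags (flag : Int) (flag_list : List String) (offset : Int) : List String :=
  if PySem.Int.bitLength flag > flag_list.length then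
    []  -- Python raises ValueError here; Pre_ excludes these inputs
  else
    (PySem.List.pyRange 0 flag_list.length 1).foldl
      (fun acc i =>
        if PySem.Int.band flag ((1 : Int) <<< (i + offset).toNat) ≠ 0 then
          acc ++ [PySem.List.pyGetD flag_list i ""]
        else acc) []

-- ===== PORT B =====
-- the 'while masked: … masked >>= 1 …' loop of Source B; masked is a nonnegative int there
-- (it was ANDed with the nonnegative mask (1 << len) - 1), so it is carried as a Nat.
def altLoop (flag_list : List String) (masked : Nat) (i : Nat) : List String :=
  if h : masked = 0 then []
  else
    (if masked &&& 1 == 1 then [flag_list.getD i ""] else [])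
      ++ altLoop flag_list (masked >>> 1) (i + 1)
termination_by masked
decreasing_by
  rw [Nat.shiftRight_one]
  exact Nat.div_lt_self (Nat.pos_of_ne_zero h) one_lt_two

def build_flags_alt (flag : Int) (flag_list : List String) (offset : Int) : List String :=
  if PySem.Int.bitLength flag > flag_list.length then
    []  -- same validation as A: Python raises ValueError here; Pre_ excludes these inputs
  else
    -- masked = (flag >> offset) & ((1 << len(flag_list)) - 1); 0 ≤ offset under Pre_
    altLoop flag_list
      (PySem.Int.band (flag >>> offset.toNat) ((1 : Int) <<< flag_list.length - 1)).toNat 0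

-- ===== PRECONDITION & SPEC =====
-- Pre_ excludes exactly the inputs where Python A raises a ValueError — bit_length(flag) >
-- len(flag_list) (A's explicit guard) or offset < 0 (negative shift count in '1 << i + offset') —
-- plus the degenerate offset < 0, flag = 0, flag_list = [] inputs where A's loop body never runs
-- and A returns [] while B's single shift 'flag >> offset' still raises (see claim cites).
def Pre_build_flags (flag : Int) (flag_list : List String) (offset : Int) : Prop :=
  PySem.Int.bitLength flag ≤ flag_list.length ∧ 0 ≤ offset
instance (flag : Int) (flag_list : List String) (offset : Int) : Decidable (Pre_build_flags flag flag_list offset) := by unfold Pre_build_flags; infer_instance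

def pvWitness_build_flags : Int × List String × Int := (5, ["a", "b", "c"], 0)

def Spec_build_flags (flag : Int) (flag_list : List String) (offset : Int) (out : List String) : Prop := out = build_flags_alt flag flag_list offset
instance (flag : Int) (flag_list : List String) (offset : Int) (out : List String) : Decidable (Spec_build_flags flag flag_list offset out) := by unfold Spec_build_flags; infer_instance

-- ===== CLAIM (what is proved, stated in full; the proofs are below) =====
def Claim_equal_build_flags : Prop := ∀ (flag : Int) (flag_list : List String) (offset : Int), Dom_build_flags flag flag_list offset → Pre_build_flags flag flag_list offset → Spec_build_flags flag flag_list offset (build_flags flag flag_list offset)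

-- ===== LEMMAS AND PROOFS =====

-- Python's 1 << n as an Int is the cast of the Nat power 2^n
theorem pv_hb2 (k : Nat) : ((1 : Int) <<< k) = ((2^k : Nat) : Int) := by
  have h0 : ((1:Int) <<< k) = ((1 <<< k : Nat) : Int) := rfl
  rw [h0, Nat.one_shiftLeft]

theorem pv_hb (n : Nat) : ((1 : Int) <<< n - 1) = ((2^n - 1 : Nat) : Int) := by
  rw [pv_hb2, Nat.cast_sub Nat.one_le_two_pow, Nat.cast_one]

-- Nat.testBit read off as a div/mod fact
theorem pv_testBit_div_mod (m k : Nat) : m.testBit k = decide (m / 2^k % 2 = 1) := by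
  simp [Nat.testBit, Nat.shiftRight_eq_div_pow]
  rcases Nat.mod_two_eq_zero_or_one (m / 2^k) with h | h <;> simp [h]

-- Python's a & ((1 << n) - 1) is a mod 2^n, whatever the sign of a
theorem pv_band_mask (a : Int) (n : Nat) :
    PySem.Int.band a ((1 : Int) <<< n - 1) = a % ((2^n : Nat) : Int) := by
  rw [pv_hb]
  cases a with
  | ofNat m =>
    have h1 : PySem.Int.band (Int.ofNat m) ((2^n - 1 : Nat) : Int) = ((m &&& (2^n - 1) : Nat) : Int) := by
      exact_mod_cast PySem.Int.band_natCast m (2^n - 1)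
    rw [h1, Nat.and_two_pow_sub_one_eq_mod, Int.ofNat_eq_natCast]
    exact (Int.natCast_mod m (2^n)).symm
  | negSucc m =>
    have hpos : 0 ≤ ((2^n - 1 : Nat) : Int) := by positivity
    have hlhs : PySem.Int.band (Int.negSucc m) ((2^n - 1 : Nat) : Int)
        = (((2^n - 1) - ((2^n - 1) &&& m) : Nat) : Int) := by
      unfold PySem.Int.band
      rw [if_neg (by simp), if_pos hpos]
      have h2 : (-(Int.negSucc m) - 1) = (m : Int) := by rw [Int.negSucc_eq]; ring
      rw [h2, Int.toNat_natCast, Int.toNat_natCast]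
    rw [hlhs, Nat.and_comm, Nat.and_two_pow_sub_one_eq_mod]
    have ht : 0 < (2:Nat)^n := Nat.two_pow_pos n
    have hr : m % 2^n < 2^n := Nat.mod_lt m ht
    have hm : (m : Int) = ↑(2^n : Nat) * ↑(m / 2^n) + ↑(m % 2^n) := by
      exact_mod_cast (Nat.div_add_mod m (2^n)).symm
    have hsplit : (Int.negSucc m)
        = ((↑(2^n : Nat) - 1 - ↑(m % 2^n)) + (-(↑(m / 2^n) : Int) - 1) * ↑(2^n : Nat)) := by
      rw [Int.negSucc_eq, hm]; ring
    rw [hsplit, Int.add_mul_emod_self_right, Int.emod_eq_of_lt (by omega) (by omega)]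
    omega

-- Python's a >> k is floor division by 2^k, whatever the sign of a
theorem pv_int_shiftRight_div (a : Int) (k : Nat) : a >>> k = a / ((2^k : Nat) : Int) := by
  cases a with
  | ofNat m =>
    have h0 : (Int.ofNat m) >>> k = ((m >>> k : Nat) : Int) := rfl
    rw [h0, Nat.shiftRight_eq_div_pow, Int.ofNat_eq_natCast, ← Int.natCast_div]
  | negSucc m =>
    have h0 : (Int.negSucc m) >>> k = Int.negSucc (m >>> k) := rfl
    rw [h0, Nat.shiftRight_eq_div_pow]
    have ht : 0 < (2:Nat)^k := Nat.two_pow_pos k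
    have hr : m % 2^k < 2^k := Nat.mod_lt m ht
    have hm : (m : Int) = ↑(2^k : Nat) * ↑(m / 2^k) + ↑(m % 2^k) := by
      exact_mod_cast (Nat.div_add_mod m (2^k)).symm
    have hsplit : (Int.negSucc m)
        = ((↑(2^k : Nat) - 1 - ↑(m % 2^k)) + (-(↑(m / 2^k) : Int) - 1) * ↑(2^k : Nat)) := by
      rw [Int.negSucc_eq, hm]; ring
    rw [hsplit, Int.add_mul_ediv_right _ _ (by omega : ((2^k : Nat) : Int) ≠ 0),
        Int.ediv_eq_zero_of_lt (by omega) (by omega), Int.negSucc_eq]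
    omega

-- Python's a & (1 << k) is nonzero iff bit k of a is set, i.e. (a >> k) % 2 == 1
theorem pv_band_bit (a : Int) (k : Nat) :
    (PySem.Int.band a ((1 : Int) <<< k) ≠ 0) ↔ (a >>> k) % 2 = 1 := by
  rw [pv_hb2]
  have ht : 0 < (2:Nat)^k := Nat.two_pow_pos k
  cases a with
  | ofNat m =>
    have htb := pv_testBit_div_mod m k
    have h1 : PySem.Int.band (Int.ofNat m) ((2^k : Nat) : Int) = ((m &&& 2^k : Nat) : Int) := by
      exact_mod_cast PySem.Int.band_natCast m (2^k)
    have h0 : (Int.ofNat m) >>> k = ((m >>> k : Nat) : Int) := rfl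
    have hc : ((((m / 2^k : Nat)) : Int) % 2 = 1) ↔ (m / 2^k) % 2 = 1 := by omega
    rw [h1, h0, Nat.and_two_pow, Nat.shiftRight_eq_div_pow, hc, Ne, Int.natCast_eq_zero]
    cases h : m.testBit k <;> rw [h] at htb <;> simp at htb <;> simp [htb]
  | negSucc m =>
    have htb := pv_testBit_div_mod m k
    have hpos : 0 ≤ ((2^k : Nat) : Int) := by positivity
    have hlhs : PySem.Int.band (Int.negSucc m) ((2^k : Nat) : Int)
        = ((2^k - (2^k &&& m) : Nat) : Int) := by
      unfold PySem.Int.band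
      rw [if_neg (by simp), if_pos hpos]
      have h2 : (-(Int.negSucc m) - 1) = (m : Int) := by rw [Int.negSucc_eq]; ring
      rw [h2, Int.toNat_natCast, Int.toNat_natCast]
    have h0 : (Int.negSucc m) >>> k = Int.negSucc (m >>> k) := rfl
    have hx : Int.negSucc (m >>> k) % 2 = 1 ↔ (m >>> k) % 2 = 0 := by
      rw [Int.negSucc_eq]; omega
    rw [hlhs, h0, hx, Nat.two_pow_and, Nat.shiftRight_eq_div_pow, Ne, Int.natCast_eq_zero]
    cases h : m.testBit k <;> rw [h] at htb <;> simp at htb <;> simp [htb]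

-- Int shifts compose
theorem pv_shiftRight_add (a : Int) (i j : Nat) : a >>> (i + j) = (a >>> i) >>> j := by
  cases a with
  | ofNat m => exact congrArg Int.ofNat (Nat.shiftRight_add m i j)
  | negSucc m => exact congrArg Int.negSucc (Nat.shiftRight_add m i j)

-- bit k < n of a mod 2^n is bit k of a
theorem pv_emod_bit (a : Int) (n k : Nat) (hk : k < n) :
    (a % ((2^n : Nat) : Int)) / ((2^k : Nat) : Int) % 2 = a / ((2^k : Nat) : Int) % 2 := by
  set T : Int := ((2^n : Nat) : Int) with hT
  set P : Int := ((2^k : Nat) : Int) with hP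
  set C : Int := ((2^(n-k-1) : Nat) : Int) with hC
  have hP0 : P ≠ 0 := by rw [hP]; positivity
  have hpow : (2:Nat)^n = 2^k * (2 * 2^(n-k-1)) := by
    have hn : n = (k + (n-k-1)) + 1 := by omega
    nth_rewrite 1 [hn]
    rw [pow_succ, pow_add]; ring
  have hTP : T = P * (2*C) := by rw [hT, hP, hC]; exact_mod_cast hpow
  set q : Int := a / T with hq
  set r : Int := a % T with hr
  have h : T * q + r = a := Int.mul_ediv_add_emod a T
  have ha : a = r + (q * (2*C)) * P := by rw [hTP] at h; linear_combination - h
  conv_rhs => rw [ha]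
  rw [Int.add_mul_ediv_right _ _ hP0,
      show q * (2*C) = (q * C) * 2 from by ring,
      Int.add_mul_emod_self_right]

-- the B loop enumerates the set bits of masked (masked < 2^n), in increasing order
theorem pv_altLoop_eq (fl : List String) (n : Nat) :
    ∀ (m i0 : Nat), m < 2^n →
      altLoop fl m i0
        = ((List.range n).filter (fun j => m >>> j % 2 == 1)).map (fun j => fl.getD (i0 + j) "") := by
  induction n with
  | zero =>
    intro m i0 hm
    interval_cases m
    simp [altLoop]
  | succ n ih =>
    intro m i0 hm
    by_cases h0 : m = 0
    · subst h0
      simp [altLoop]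
    · rw [altLoop]
      rw [dif_neg h0, Nat.shiftRight_one, Nat.and_one_is_mod]
      have hdiv : m / 2 < 2^n := by
        have : (2:Nat)^(n+1) = 2 * 2^n := by rw [pow_succ]; ring
        omega
      rw [ih (m/2) (i0+1) hdiv]
      rw [List.range_succ_eq_map, List.filter_cons, List.filter_map]
      have hj : ∀ j : Nat, ((fun j => m >>> j % 2 == 1) ∘ Nat.succ) j = (fun j => (m/2) >>> j % 2 == 1) j := by
        intro j
        simp only [Function.comp]
        rw [show Nat.succ j = 1 + j from by omega, Nat.shiftRight_add, Nat.shiftRight_one]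
      rw [List.filter_congr (fun j _ => hj j)]
      have hmap : ∀ j : Nat, ((fun j => fl.getD (i0 + j) "") ∘ Nat.succ) j
          = (fun j => fl.getD ((i0+1) + j) "") j := by
        intro j; simp only [Function.comp]; congr 1; omega
      rw [Nat.shiftRight_zero]
      by_cases hpar : (m % 2 == 1) = true
      · rw [if_pos hpar, if_pos hpar, List.map_cons, List.map_map,
            List.map_congr_left (fun j _ => hmap j)]
        simp
      · rw [if_neg hpar, if_neg hpar, List.map_map,
            List.map_congr_left (fun j _ => hmap j)]
        simp

-- A's per-index test reads exactly bit k of B's masked window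
theorem pv_cond (flag : Int) (off len k : Nat) (hk : k < len) :
    (PySem.Int.band flag ((1:Int) <<< (k + off)) ≠ 0)
      ↔ (PySem.Int.band (flag >>> off) ((1:Int) <<< len - 1)).toNat >>> k % 2 = 1 := by
  set M : Int := PySem.Int.band (flag >>> off) ((1:Int) <<< len - 1) with hMdef
  have hM : M = (flag >>> off) % ((2^len : Nat) : Int) := pv_band_mask (flag >>> off) len
  have htpos : (0:Int) < ((2^len : Nat) : Int) := by positivity
  have hM0 : 0 ≤ M := by rw [hM]; exact Int.emod_nonneg _ (by omega)
  have hMt : ((M.toNat : Nat) : Int) = M := Int.toNat_of_nonneg hM0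
  have hR : (M.toNat >>> k % 2 = 1) ↔ (M / ((2^k : Nat) : Int)) % 2 = 1 := by
    have h1 : (M / ((2^k : Nat) : Int)) = ((M.toNat / 2^k : Nat) : Int) := by
      conv_lhs => rw [← hMt]
      rw [← Int.natCast_div]
    rw [h1, Nat.shiftRight_eq_div_pow]
    omega
  rw [hR, hM, pv_emod_bit (flag >>> off) len k hk, pv_band_bit,
      show k + off = off + k from Nat.add_comm k off, pv_shiftRight_add,
      pv_int_shiftRight_div (flag >>> off) k]

-- ===== VERDICT (by name: the statement is the Claim_ definition above) =====
theorem build_flags_spec : Claim_equal_build_flags := by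
  intro flag fl offset _hdom hpre
  obtain ⟨hbl, hoff⟩ := hpre
  unfold Spec_build_flags build_flags build_flags_alt
  by_cases hg : PySem.Int.bitLength flag > fl.length
  · rw [if_pos hg, if_pos hg]
  · rw [if_neg hg, if_neg hg]
    have htpos : (0:Int) < ((2^fl.length : Nat) : Int) := by positivity
    have hM : PySem.Int.band (flag >>> offset.toNat) ((1:Int) <<< fl.length - 1)
        = (flag >>> offset.toNat) % ((2^fl.length : Nat) : Int) :=
      pv_band_mask (flag >>> offset.toNat) fl.length
    have hM0 : 0 ≤ PySem.Int.band (flag >>> offset.toNat) ((1:Int) <<< fl.length - 1) := by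
      rw [hM]; exact Int.emod_nonneg _ (by omega)
    have hMlt : PySem.Int.band (flag >>> offset.toNat) ((1:Int) <<< fl.length - 1)
        < ((2^fl.length : Nat) : Int) := by
      rw [hM]; exact Int.emod_lt_of_pos _ htpos
    have hmlt : (PySem.Int.band (flag >>> offset.toNat) ((1:Int) <<< fl.length - 1)).toNat
        < 2^fl.length := by omega
    rw [pv_altLoop_eq fl fl.length _ 0 hmlt]
    rw [PySem.List.pyRange_zero_nat, List.foldl_map]
    rw [PySem.List.foldl_append_ite
        (p := fun (k:Nat) => PySem.Int.band flag ((1:Int) <<< (((k:Int) + offset).toNat)) ≠ 0)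
        (f := fun (k:Nat) => PySem.List.pyGetD fl (k:Int) ""), List.nil_append]
    have hcond : ∀ k ∈ List.range fl.length,
        (decide (PySem.Int.band flag ((1:Int) <<< (((k:Int) + offset).toNat)) ≠ 0))
          = ((PySem.Int.band (flag >>> offset.toNat) ((1:Int) <<< fl.length - 1)).toNat >>> k % 2 == 1) := by
      intro k hk
      have hk' : k < fl.length := List.mem_range.mp hk
      have hto : (((k:Int) + offset).toNat) = k + offset.toNat := by omega
      rw [hto]
      have hiff := pv_cond flag offset.toNat fl.length k hk'
      by_cases hx : (PySem.Int.band (flag >>> offset.toNat) ((1:Int) <<< fl.length - 1)).toNat >>> k % 2 = 1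
      · simp [hx, hiff.mpr hx]
      · simp [hx, show ¬ (PySem.Int.band flag ((1:Int) <<< (k + offset.toNat)) ≠ 0)
            from fun h => hx (hiff.mp h)]
    rw [List.filter_congr hcond]
    have hmapc : ∀ j ∈ (List.range fl.length).filter
        (fun j => (PySem.Int.band (flag >>> offset.toNat) ((1:Int) <<< fl.length - 1)).toNat >>> j % 2 == 1),
        PySem.List.pyGetD fl (j:Int) "" = fl.getD (0 + j) "" := by
      intro j _
      rw [PySem.List.pyGetD_natCast]
      congr 1
      omega
    exact List.map_congr_left hmapc
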